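-- pv_equiv track=rewrite | github.com/Mniszko/data-analysis | prereq.py | turning_points_homebrew
-- ===== SOURCE A (Python) =====
-- def simplifier(arr,cut_last=True,cut_first=True):
--     chng = arr[0]
--     if cut_first:
--         finarr = []
--     else:
--         finarr = []
--     for itr in arr[1:]:
--         if abs(chng-itr) > 10:
--             finarr.append(itr)
--         chng = itr
--
--     if cut_last:
--         finarr = finarr[:-1]
--
--     return finarr
--
-- def turning_points_homebrew(B,auto_simplify=False):
--     znak = 1
--     arri=[]
--     for i in range(len(B)-1):
--         ZNAK_TEMP = 1
--         x1 = B[i]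
--         x2 = B[i+1]
--         chng = x2-x1
--         if chng == 0:
--             ZNAK_TEMP = znak
--         elif chng == abs(chng):
--             ZNAK_TEMP = 1
--         elif chng != abs(chng):
--             ZNAK_TEMP = -1
--
--         if (ZNAK_TEMP != znak):
--             arri.append(i)
--
--         znak = ZNAK_TEMP
--
--     if auto_simplify:
--         arri = simplifier(arri)
--     return arri
-- ===== SOURCE B (Python) =====
-- def _simplify(arr):
--     kept = [b for a, b in zip(arr, arr[1:]) if abs(a - b) > 10]
--     return kept[:-1]
--
-- def turning_points_homebrew(B, auto_simplify=False):
--     # pass 1: sign table (sign of each adjacent difference, zeros carry the previous sign, seeded at 1)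
--     signs = []
--     s = 1
--     for a, b in zip(B, B[1:]):
--         d = b - a
--         if d > 0:
--             s = 1
--         elif d < 0:
--             s = -1
--         signs.append(s)
--     # pass 2: turning points = positions where the sign table changes (virtual sign before index 0 is 1)
--     out = []
--     prev = 1
--     for i, s in enumerate(signs):
--         if s != prev:
--             out.append(i)
--         prev = s
--     if auto_simplify:
--         out = _simplify(out)
--     return out
-- ===== Notes on version B (the rewrite author's own statement) =====
-- stated objective: simpler
-- what changed: B separates the work into two explicit passes - first building the carried sign table of adjacent differences, then scanning that table for positions where it changes - and replaces simplifier's seeded index loop by a zip comprehension; A fuses sign computation and change detection in one index loop over B.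
import Mathlib
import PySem

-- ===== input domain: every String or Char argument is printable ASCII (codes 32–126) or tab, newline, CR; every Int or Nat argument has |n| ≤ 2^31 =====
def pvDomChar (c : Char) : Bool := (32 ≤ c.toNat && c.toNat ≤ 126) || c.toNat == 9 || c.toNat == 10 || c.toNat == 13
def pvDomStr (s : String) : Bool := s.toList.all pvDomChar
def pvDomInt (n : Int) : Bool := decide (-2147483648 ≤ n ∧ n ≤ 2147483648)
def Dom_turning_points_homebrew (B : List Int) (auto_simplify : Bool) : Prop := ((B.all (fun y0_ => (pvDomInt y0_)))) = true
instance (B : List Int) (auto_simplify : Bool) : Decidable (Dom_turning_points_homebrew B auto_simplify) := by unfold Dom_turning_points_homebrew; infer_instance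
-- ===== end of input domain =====

-- B rebuilds the result in two passes (carried sign table, then change scan) instead of A's fused
-- index loop; objective: simpler. Equality of return values is proved on Pre_ (where A returns).

-- ===== PORT A =====
-- port of simplifier(arr, cut_last=True, cut_first=True); indexing the first element of [] raises IndexError in Python,
-- that call is excluded by Pre_; the [] branch here is a placeholder never reached under Pre_.
def simplifierA (arr : List Int) (cut_last : Bool) (_cut_first : Bool) : List Int :=
  match arr with
  | [] => []
  | chng0 :: rest =>
    let st := rest.foldl (fun (st : Int × List Int) itr =>
        (itr, if 10 < |st.1 - itr| then st.2 ++ [itr] else st.2)) (chng0, [])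
    if cut_last then st.2.dropLast else st.2

def turning_points_homebrew (B : List Int) (auto_simplify : Bool) : List Int :=
  let st := (List.range (B.length - 1)).foldl (fun (st : Int × List Int) i =>
      let znak := st.1
      let x1 := B.getD i 0
      let x2 := B.getD (i+1) 0
      let chng := x2 - x1
      let ZNAK_TEMP : Int := if chng = 0 then znak else if chng = |chng| then 1 else -1
      (ZNAK_TEMP, if ZNAK_TEMP ≠ znak then st.2 ++ [(i : Int)] else st.2)) (1, [])
  let arri := st.2
  if auto_simplify then simplifierA arri true true else arri

-- ===== PORT B =====
def simplifyB (arr : List Int) : List Int :=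
  ((((arr.zip arr.tail).filter (fun p => 10 < |p.1 - p.2|)).map (fun p => p.2))).dropLast

def turning_points_homebrew_alt (B : List Int) (auto_simplify : Bool) : List Int :=
  let signs := ((B.zip B.tail).foldl (fun (st : Int × List Int) p =>
      let d := p.2 - p.1
      let s : Int := if 0 < d then 1 else if d < 0 then -1 else st.1
      (s, st.2 ++ [s])) (1, [])).2
  let out := (signs.zipIdx.foldl (fun (st : Int × List Int) q =>
      (q.1, if q.1 ≠ st.1 then st.2 ++ [(q.2 : Int)] else st.2)) (1, [])).2
  if auto_simplify then simplifyB out else out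

-- ===== PRECONDITION & SPEC =====
-- Pre_ excludes exactly the inputs where A raises: auto_simplify set and no adjacent strictly
-- decreasing pair, so the turning-point list is empty and simplifier raises IndexError reading its first element.
def Pre_turning_points_homebrew (B : List Int) (auto_simplify : Bool) : Prop :=
  auto_simplify = true → ∃ p ∈ B.zip B.tail, p.2 < p.1
instance (B : List Int) (auto_simplify : Bool) : Decidable (Pre_turning_points_homebrew B auto_simplify) := by
  unfold Pre_turning_points_homebrew; infer_instance

def pvWitness_turning_points_homebrew : List Int × Bool := ([3, 1, 2], true)

def Spec_turning_points_homebrew (B : List Int) (auto_simplify : Bool) (out : List Int) : Prop := out = turning_points_homebrew_alt B auto_simplify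
instance (B : List Int) (auto_simplify : Bool) (out : List Int) : Decidable (Spec_turning_points_homebrew B auto_simplify out) := by unfold Spec_turning_points_homebrew; infer_instance

-- ===== CLAIM (what is proved, stated in full; the proofs are below) =====
def Claim_equal_turning_points_homebrew : Prop := ∀ (B : List Int) (auto_simplify : Bool), Dom_turning_points_homebrew B auto_simplify → Pre_turning_points_homebrew B auto_simplify → Spec_turning_points_homebrew B auto_simplify (turning_points_homebrew B auto_simplify)


-- ===== LEMMAS AND PROOFS =====

-- reference semantics of the shared turning-point computation, over the adjacent-pair list
def fsRef (z : Int) : List (Int × Int) → Int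
  | [] => z
  | (a, b) :: t => fsRef (if 0 < b - a then 1 else if b - a < 0 then -1 else z) t

def chgRef : Int → Nat → List (Int × Int) → List Int
  | _, _, [] => []
  | z, k, (a, b) :: t =>
    let s : Int := if 0 < b - a then 1 else if b - a < 0 then -1 else z
    (if s ≠ z then [(k : Int)] else []) ++ chgRef s (k + 1) t

def signsRef (z : Int) : List (Int × Int) → List Int
  | [] => []
  | (a, b) :: t =>
    let s : Int := if 0 < b - a then 1 else if b - a < 0 then -1 else z
    s :: signsRef s t

lemma sign_eq (z d : Int) :
    (if d = 0 then z else if d = |d| then 1 else -1)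
      = (if 0 < d then (1 : Int) else if d < 0 then -1 else z) := by
  simp only [Int.abs_eq_natAbs]
  split_ifs <;> omega

lemma length_zip_tail (B : List Int) : (B.zip B.tail).length = B.length - 1 := by
  simp [List.length_zip, List.length_tail]

lemma drop_zip_tail {B : List Int} {k : Nat} {a b : Int} {t : List (Int × Int)}
    (h : (B.zip B.tail).drop k = (a, b) :: t) :
    B.getD k 0 = a ∧ B.getD (k + 1) 0 = b ∧ (B.zip B.tail).drop (k + 1) = t := by
  have h0 : (B.zip B.tail)[k]? = some (a, b) := by
    have h1 : ((B.zip B.tail).drop k)[0]? = some (a, b) := by rw [h]; rfl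
    rw [List.getElem?_drop] at h1
    simpa using h1
  rw [List.getElem?_zip_eq_some] at h0
  obtain ⟨hA, hB⟩ := h0
  refine ⟨?_, ?_, ?_⟩
  · simp [List.getD, hA]
  · have : B[k+1]? = some b := by rw [← List.getElem?_tail]; exact hB
    simp [List.getD, this]
  · have : (B.zip B.tail).drop (k + 1) = ((B.zip B.tail).drop k).drop 1 := by
      rw [List.drop_drop]
    rw [this, h]
    simp

lemma A_loop (B : List Int) : ∀ (l : List (Int × Int)) (k : Nat) (z : Int) (acc : List Int),
    (B.zip B.tail).drop k = l →
    (List.range' k l.length).foldl (fun (st : Int × List Int) i =>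
      let znak := st.1
      let x1 := B.getD i 0
      let x2 := B.getD (i+1) 0
      let chng := x2 - x1
      let ZNAK_TEMP : Int := if chng = 0 then znak else if chng = |chng| then 1 else -1
      (ZNAK_TEMP, if ZNAK_TEMP ≠ znak then st.2 ++ [(i : Int)] else st.2)) (z, acc)
      = (fsRef z l, acc ++ chgRef z k l) := by
  intro l
  induction l with
  | nil => intro k z acc _; simp [fsRef, chgRef]
  | cons hd t ih =>
    intro k z acc h
    obtain ⟨a, b⟩ := hd
    obtain ⟨ha, hb, ht⟩ := drop_zip_tail h
    have hr : List.range' k (t.length + 1) = k :: List.range' (k + 1) t.length := by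
      simp [List.range'_succ]
    simp only [List.length_cons, hr, List.foldl_cons]
    rw [ha, hb, sign_eq z (b - a)]
    rw [ih (k + 1) _ _ ht]
    clear ih h
    simp only [fsRef, chgRef]
    generalize (if 0 < b - a then (1 : Int) else if b - a < 0 then -1 else z) = s
    by_cases hc : s = z <;> simp [hc]

lemma B_signs : ∀ (l : List (Int × Int)) (z : Int) (acc : List Int),
    l.foldl (fun (st : Int × List Int) p =>
      let d := p.2 - p.1
      let s : Int := if 0 < d then 1 else if d < 0 then -1 else st.1
      (s, st.2 ++ [s])) (z, acc) = (fsRef z l, acc ++ signsRef z l) := by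
  intro l
  induction l with
  | nil => intro z acc; simp [fsRef, signsRef]
  | cons hd t ih =>
    intro z acc
    obtain ⟨a, b⟩ := hd
    simp only [List.foldl_cons, fsRef, signsRef]
    rw [ih]
    simp

lemma B_scan : ∀ (l : List (Int × Int)) (z : Int) (k : Nat) (acc : List Int),
    ((signsRef z l).zipIdx k).foldl (fun (st : Int × List Int) q =>
      (q.1, if q.1 ≠ st.1 then st.2 ++ [(q.2 : Int)] else st.2)) (z, acc)
      = (fsRef z l, acc ++ chgRef z k l) := by
  intro l
  induction l with
  | nil => intro z k acc; simp [fsRef, signsRef, chgRef]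
  | cons hd t ih =>
    intro z k acc
    obtain ⟨a, b⟩ := hd
    simp only [signsRef, fsRef, chgRef, List.zipIdx_cons, List.foldl_cons]
    rw [ih]
    clear ih
    generalize (if 0 < b - a then (1 : Int) else if b - a < 0 then -1 else z) = s
    by_cases hc : s = z <;> simp [hc]

-- both cores compute chgRef 1 0 (B.zip B.tail)
lemma core_eq (B : List Int) :
    ((List.range (B.length - 1)).foldl (fun (st : Int × List Int) i =>
      let znak := st.1
      let x1 := B.getD i 0
      let x2 := B.getD (i+1) 0
      let chng := x2 - x1
      let ZNAK_TEMP : Int := if chng = 0 then znak else if chng = |chng| then 1 else -1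
      (ZNAK_TEMP, if ZNAK_TEMP ≠ znak then st.2 ++ [(i : Int)] else st.2)) (1, [])).2
      = chgRef 1 0 (B.zip B.tail) := by
  have h := A_loop B (B.zip B.tail) 0 1 [] (by simp)
  rw [List.range_eq_range', ← length_zip_tail B, h]
  simp

lemma alt_core_eq (B : List Int) :
    ((((B.zip B.tail).foldl (fun (st : Int × List Int) p =>
      let d := p.2 - p.1
      let s : Int := if 0 < d then 1 else if d < 0 then -1 else st.1
      (s, st.2 ++ [s])) (1, [])).2.zipIdx).foldl (fun (st : Int × List Int) q =>
      (q.1, if q.1 ≠ st.1 then st.2 ++ [(q.2 : Int)] else st.2)) (1, [])).2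
      = chgRef 1 0 (B.zip B.tail) := by
  rw [B_signs]
  simpa using congrArg Prod.snd (B_scan (B.zip B.tail) 1 0 [])

lemma simplifier_eq : ∀ (arr : List Int), simplifierA arr true true = simplifyB arr := by
  have key : ∀ (rest : List Int) (chng : Int) (acc : List Int),
      (rest.foldl (fun (st : Int × List Int) itr =>
        (itr, if 10 < |st.1 - itr| then st.2 ++ [itr] else st.2)) (chng, acc)).2
      = acc ++ (((chng :: rest).zip rest).filter (fun p => 10 < |p.1 - p.2|)).map (fun p => p.2) := by
    intro rest
    induction rest with
    | nil => intro chng acc; simp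
    | cons itr t ih =>
      intro chng acc
      simp only [List.foldl_cons, List.zip_cons_cons, List.filter_cons]
      rw [ih]
      by_cases h : 10 < |chng - itr|
      · simp [h]
      · simp [h]
  intro arr
  match arr with
  | [] => simp [simplifierA, simplifyB]
  | a :: rest =>
    simp only [simplifierA, simplifyB, if_pos]
    rw [key rest a []]
    simp [List.tail]

lemma ports_eq (B : List Int) (auto_simplify : Bool) :
    turning_points_homebrew B auto_simplify = turning_points_homebrew_alt B auto_simplify := by
  unfold turning_points_homebrew turning_points_homebrew_alt
  simp only []
  rw [core_eq]
  rw [show (((B.zip B.tail).foldl (fun (st : Int × List Int) p =>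
      let d := p.2 - p.1
      let s : Int := if 0 < d then 1 else if d < 0 then -1 else st.1
      (s, st.2 ++ [s])) (1, [])).2.zipIdx.foldl (fun (st : Int × List Int) q =>
      (q.1, if q.1 ≠ st.1 then st.2 ++ [(q.2 : Int)] else st.2)) (1, [])).2
      = chgRef 1 0 (B.zip B.tail) from alt_core_eq B]
  cases auto_simplify with
  | false => simp
  | true => simp [simplifier_eq]

-- ===== VERDICT (by name: the statement is the Claim_ definition above) =====
theorem turning_points_homebrew_spec : Claim_equal_turning_points_homebrew := by
  intro B auto_simplify _ _
  unfold Spec_turning_points_homebrew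
  exact ports_eq B auto_simplify
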